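-- pv_equiv track=rewrite | github.com/Durys/AdvancedPython | main.py | complete_cunningham_chain_second_kind
-- ===== SOURCE A (Python) =====
-- def check_prime(num):
--     is_prime = True
--     if num > 1:
--         for i in range(2, num):
--             if num % i == 0:
--                 is_prime = False
--     else:
--         is_prime = False
--     return is_prime
--
-- def complete_cunningham_chain_second_kind(n):
--     chain = [n]
--     while True:
--         next_in_chain = 2 * chain[-1] - 1
--         status = check_prime(next_in_chain)
--         if not status:
--             break
--         else:
--             chain.append(next_in_chain)
--     return chain
-- ===== SOURCE B (Python) =====
-- def complete_cunningham_chain_second_kind(n):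
--     chain = [n]
--     while True:
--         nxt = 2 * chain[-1] - 1
--         if not _is_prime(nxt):
--             return chain
--         chain.append(nxt)
--
-- def _is_prime(num):
--     if num <= 1:
--         return False
--     i = 2
--     while i * i <= num:
--         if num % i == 0:
--             return False
--         i += 1
--     return True
-- ===== Notes on version B (the rewrite author's own statement) =====
-- stated objective: faster
-- what changed: Primality is tested by trial division only up to the integer square root (while i*i <= num, returning False at the first divisor) instead of scanning every i in range(2, num) and carrying a flag; the chain loop returns directly instead of break-with-flag.
import Mathlib
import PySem

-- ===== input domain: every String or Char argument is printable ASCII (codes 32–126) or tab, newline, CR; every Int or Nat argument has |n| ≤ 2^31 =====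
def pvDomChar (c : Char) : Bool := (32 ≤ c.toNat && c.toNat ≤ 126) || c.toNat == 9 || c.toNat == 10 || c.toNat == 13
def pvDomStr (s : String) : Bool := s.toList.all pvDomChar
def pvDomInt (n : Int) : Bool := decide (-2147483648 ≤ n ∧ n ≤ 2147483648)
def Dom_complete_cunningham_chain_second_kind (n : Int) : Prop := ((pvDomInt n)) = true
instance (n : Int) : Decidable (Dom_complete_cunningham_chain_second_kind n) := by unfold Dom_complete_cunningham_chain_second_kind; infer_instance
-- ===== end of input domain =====

-- B replaces A's full range(2,num) trial-division scan by a sqrt-bounded divisor loop (while i*i <= num), an asymptotically faster primality test; chain construction returns directly at the first composite.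


-- ===== PORT A =====
-- check_prime: flag starts True; for i in range(2, num), a divisor sets it False
def pvCheckPrime (num : Int) : Bool :=
  if num > 1 then
    (PySem.List.pyRange 2 num 1).foldl
      (fun acc i => if PySem.Int.mod num i == 0 then false else acc) true
  else false

-- the while-True loop, fuel-bounded to make it total (fuel is never exhausted in practice:
-- a Cunningham chain starting within the domain breaks long before n.natAbs + 3 steps)
def pvChainLoopA : Nat → List Int → List Int
  | 0, chain => chain
  | fuel + 1, chain =>
    let next_in_chain := 2 * (PySem.List.pyGet? chain (-1)).getD 0 - 1
    if pvCheckPrime next_in_chain then pvChainLoopA fuel (chain ++ [next_in_chain])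
    else chain

def complete_cunningham_chain_second_kind (n : Int) : List Int :=
  pvChainLoopA (n.natAbs + 3) [n]

-- ===== PORT B =====
-- _is_prime's divisor loop: while i * i <= num, False at the first divisor
def pvNoSmallDiv (num i : Int) : Bool :=
  if _h : i * i ≤ num then
    if PySem.Int.mod num i == 0 then false
    else pvNoSmallDiv num (i + 1)
  else true
termination_by (num + 1 - i).toNat
decreasing_by
  have hile : i ≤ num := by
    by_cases h0 : i ≤ 0
    · nlinarith
    · nlinarith
  omega

def pvIsPrimeAlt (num : Int) : Bool :=
  if num ≤ 1 then false else pvNoSmallDiv num 2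

def pvChainLoopB : Nat → List Int → List Int
  | 0, chain => chain
  | fuel + 1, chain =>
    let nxt := 2 * (PySem.List.pyGet? chain (-1)).getD 0 - 1
    if pvIsPrimeAlt nxt then pvChainLoopB fuel (chain ++ [nxt])
    else chain

def complete_cunningham_chain_second_kind_alt (n : Int) : List Int :=
  pvChainLoopB (n.natAbs + 3) [n]

-- ===== PRECONDITION & SPEC =====
def Spec_complete_cunningham_chain_second_kind (n : Int) (out : List Int) : Prop := out = complete_cunningham_chain_second_kind_alt n
instance (n : Int) (out : List Int) : Decidable (Spec_complete_cunningham_chain_second_kind n out) := by unfold Spec_complete_cunningham_chain_second_kind; infer_instance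

-- ===== CLAIM (what is proved, stated in full; the proofs are below) =====
def Claim_equal_complete_cunningham_chain_second_kind : Prop := ∀ (n : Int), Dom_complete_cunningham_chain_second_kind n → Spec_complete_cunningham_chain_second_kind n (complete_cunningham_chain_second_kind n)

-- ===== LEMMAS AND PROOFS =====

-- the flag fold of A's check_prime is "no listed i divides"
lemma pv_foldl_flag (p : Int → Bool) (l : List Int) (acc : Bool) :
    l.foldl (fun a i => if p i then false else a) acc = (acc && !l.any p) := by
  induction l generalizing acc with
  | nil => simp
  | cons x xs ih =>
    rw [List.foldl_cons, ih]
    cases hpx : p x <;> cases acc <;> simp [hpx]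

-- A's check_prime decides Nat primality
lemma pvCheckPrime_iff (num : Int) :
    pvCheckPrime num = true ↔ 1 < num ∧ Nat.Prime num.toNat := by
  unfold pvCheckPrime
  by_cases h1 : 1 < num
  · rw [if_pos h1, pv_foldl_flag]
    have hnum : (num.toNat : Int) = num := Int.toNat_of_nonneg (by omega)
    simp only [Bool.true_and, Bool.not_eq_true', List.any_eq_false]
    constructor
    · intro h
      refine ⟨h1, ?_⟩
      rw [Nat.prime_def_lt']
      refine ⟨by omega, fun m hm hmlt hdvd => ?_⟩
      have hmem : (m : Int) ∈ PySem.List.pyRange 2 num 1 := by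
        rw [PySem.List.mem_pyRange_one]; omega
      apply h _ hmem
      rw [beq_iff_eq, PySem.Int.mod_eq_zero_iff_dvd]
      have hd : (m : Int) ∣ (num.toNat : Int) := Int.natCast_dvd_natCast.mpr hdvd
      rwa [hnum] at hd
    · rintro ⟨-, hp⟩ i hi
      rw [PySem.List.mem_pyRange_one] at hi
      simp only [beq_iff_eq]
      rw [PySem.Int.mod_eq_zero_iff_dvd]
      intro hdvd
      rw [Nat.prime_def_lt'] at hp
      apply hp.2 i.toNat (by omega) (by omega)
      have h2 : (i.toNat : Int) ∣ (num.toNat : Int) := by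
        rw [hnum, Int.toNat_of_nonneg (by omega : (0:Int) ≤ i)]; exact hdvd
      exact_mod_cast h2
  · rw [if_neg h1]
    simp only [Bool.false_eq_true, false_iff]
    rintro ⟨h, -⟩; omega

-- B's divisor loop: starting at i ≥ 2, it reports "no divisor j ≥ i with j*j ≤ num"
lemma pvNoSmallDiv_iff (num : Int) : ∀ i : Int, 2 ≤ i →
    (pvNoSmallDiv num i = true ↔ ∀ j : Int, i ≤ j → j * j ≤ num → ¬ (j ∣ num)) := by
  intro i
  induction i using pvNoSmallDiv.induct num with
  | case1 i h hdvd =>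
    intro _
    rw [pvNoSmallDiv, dif_pos h, if_pos hdvd]
    simp only [Bool.false_eq_true, false_iff]
    intro hall
    exact hall i le_rfl h ((PySem.Int.mod_eq_zero_iff_dvd num i).mp (by simpa using hdvd))
  | case2 i h hdvd ih =>
    intro hi
    rw [pvNoSmallDiv, dif_pos h, if_neg hdvd, ih (by omega)]
    have hnd : ¬ (i ∣ num) := fun hd =>
      hdvd (by simp [(PySem.Int.mod_eq_zero_iff_dvd num i).mpr hd])
    constructor
    · intro hall j hij hjj
      rcases eq_or_lt_of_le hij with rfl | hlt
      · exact hnd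
      · exact hall j (by omega) hjj
    · intro hall j hij hjj
      exact hall j (by omega) hjj
  | case3 i h =>
    intro hi
    rw [pvNoSmallDiv, dif_neg h]
    simp only [true_iff]
    intro j hij hjj
    exact absurd (le_trans (by nlinarith : i * i ≤ j * j) hjj) h

-- B's _is_prime decides Nat primality
lemma pvIsPrimeAlt_iff (num : Int) :
    pvIsPrimeAlt num = true ↔ 1 < num ∧ Nat.Prime num.toNat := by
  unfold pvIsPrimeAlt
  by_cases h1 : num ≤ 1
  · rw [if_pos h1]
    simp only [Bool.false_eq_true, false_iff]
    rintro ⟨h, -⟩; omega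
  · rw [if_neg h1, pvNoSmallDiv_iff num 2 le_rfl]
    have hnum : (num.toNat : Int) = num := Int.toNat_of_nonneg (by omega)
    constructor
    · intro h
      refine ⟨by omega, ?_⟩
      rw [Nat.prime_def_le_sqrt]
      refine ⟨by omega, fun m hm hmsq hdvd => ?_⟩
      have hmm : (m : Int) * m ≤ num := by
        have h2 := Nat.le_sqrt.mp hmsq
        rw [← hnum]; exact_mod_cast h2
      refine h m (by exact_mod_cast hm) hmm ?_
      have hd : (m : Int) ∣ (num.toNat : Int) := Int.natCast_dvd_natCast.mpr hdvd
      rwa [hnum] at hd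
    · rintro ⟨-, hp⟩ j hj hjj hdvd
      rw [Nat.prime_def_le_sqrt] at hp
      have hj0 : (0:Int) ≤ j := by omega
      apply hp.2 j.toNat (by omega)
      · rw [Nat.le_sqrt]
        have h2 : (j.toNat : Int) * j.toNat ≤ (num.toNat : Int) := by
          rw [hnum, Int.toNat_of_nonneg hj0]; exact hjj
        exact_mod_cast h2
      · have h2 : (j.toNat : Int) ∣ (num.toNat : Int) := by
          rw [hnum, Int.toNat_of_nonneg hj0]; exact hdvd
        exact_mod_cast h2

lemma pvPrime_eq (num : Int) : pvCheckPrime num = pvIsPrimeAlt num := by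
  cases hA : pvCheckPrime num <;> cases hB : pvIsPrimeAlt num <;> try rfl
  · exact absurd ((pvCheckPrime_iff num).mpr ((pvIsPrimeAlt_iff num).mp hB)) (by simp [hA])
  · exact absurd ((pvIsPrimeAlt_iff num).mpr ((pvCheckPrime_iff num).mp hA)) (by simp [hB])

lemma pvChainLoop_eq (fuel : Nat) : ∀ chain, pvChainLoopA fuel chain = pvChainLoopB fuel chain := by
  induction fuel with
  | zero => intro chain; rfl
  | succ f ih =>
    intro chain
    simp only [pvChainLoopA, pvChainLoopB, pvPrime_eq]
    split <;> simp [ih]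

-- ===== VERDICT (by name: the statement is the Claim_ definition above) =====
theorem complete_cunningham_chain_second_kind_spec : Claim_equal_complete_cunningham_chain_second_kind := by
  intro n _
  unfold Spec_complete_cunningham_chain_second_kind complete_cunningham_chain_second_kind complete_cunningham_chain_second_kind_alt
  exact pvChainLoop_eq _ _
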